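-- pv_equiv track=rewrite | github.com/micduan/schedulegenwebapp | app/Course.py | get_times_used
-- ===== SOURCE A (Python) =====
-- def get_times_used(start_time, end_time):
-- 	"""
-- 	start_time (int) : represents time course starts
-- 	end_time (int) : represents time course ends
-- 	returns a list of all course blocks used (e.g. from 8:30 - 9:20, 8:30 - 9:00 are used, and 9:00 - 9:30 are used)
-- 	"""
-- 	current_number = start_time
-- 	times = []
-- 	while current_number < end_time + 1:
-- 		minute = current_number % 100
-- 		if (minute % 30 == 0) and (minute < 60):
-- 			times.append(current_number)
-- 		if minute == 59:
-- 			current_number += 41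
-- 		else:
-- 			current_number += 1
--
-- 	return times
-- ===== SOURCE B (Python) =====
-- def get_times_used(start_time, end_time):
--     # Jump directly from one half-hour block to the next (alternating +30 / +70)
--     # instead of scanning every minute.
--     m = start_time % 100
--     if m == 0:
--         c = start_time
--     elif m <= 30:
--         c = start_time + (30 - m)
--     else:
--         c = start_time + (100 - m)
--     times = []
--     while c <= end_time:
--         times.append(c)
--         c += 30 if c % 100 == 0 else 70
--     return times
-- ===== Notes on version B (the rewrite author's own statement) =====
-- stated objective: faster
-- what changed: B jumps from one half-hour block directly to the next (computing the first block with an arithmetic formula, then alternating +30/+70 steps) instead of scanning every minute with a per-minute carry.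
import Mathlib
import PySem

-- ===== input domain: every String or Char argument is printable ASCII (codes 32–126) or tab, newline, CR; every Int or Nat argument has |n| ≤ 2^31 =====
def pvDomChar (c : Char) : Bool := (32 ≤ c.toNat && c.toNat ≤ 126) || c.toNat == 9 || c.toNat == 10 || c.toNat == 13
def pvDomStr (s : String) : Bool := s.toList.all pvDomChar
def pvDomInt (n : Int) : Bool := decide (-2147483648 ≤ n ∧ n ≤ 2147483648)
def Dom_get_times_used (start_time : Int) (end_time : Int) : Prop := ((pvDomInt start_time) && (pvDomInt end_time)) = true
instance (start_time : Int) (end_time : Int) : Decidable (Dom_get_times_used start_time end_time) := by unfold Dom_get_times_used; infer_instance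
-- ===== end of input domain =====

-- B jumps from one half-hour block directly to the next (first block by formula, then
-- alternating +30/+70 steps) instead of scanning every minute; same return value.


-- ===== PORT A =====
-- the `while current_number < end_time + 1` loop of A (minute = current_number % 100 inlined)
def aLoop (end_time : Int) (current_number : Int) (times : List Int) : List Int :=
  if current_number < end_time + 1 then
    aLoop end_time
      (if PySem.Int.mod current_number 100 = 59 then current_number + 41 else current_number + 1)
      (if PySem.Int.mod (PySem.Int.mod current_number 100) 30 = 0 ∧ PySem.Int.mod current_number 100 < 60
       then times ++ [current_number] else times)
  else times
termination_by (end_time + 1 - current_number).toNat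
decreasing_by split <;> omega

def get_times_used (start_time : Int) (end_time : Int) : List Int :=
  aLoop end_time start_time []

-- ===== PORT B =====
-- the `while c <= end_time` loop of B
def bLoop (end_time : Int) (c : Int) (times : List Int) : List Int :=
  if c ≤ end_time then
    bLoop end_time (c + (if PySem.Int.mod c 100 = 0 then 30 else 70)) (times ++ [c])
  else times
termination_by (end_time + 1 - c).toNat
decreasing_by split <;> omega

def get_times_used_alt (start_time : Int) (end_time : Int) : List Int :=
  bLoop end_time
    (if PySem.Int.mod start_time 100 = 0 then start_time
     else if PySem.Int.mod start_time 100 ≤ 30 then start_time + (30 - PySem.Int.mod start_time 100)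
     else start_time + (100 - PySem.Int.mod start_time 100)) []

-- ===== PRECONDITION & SPEC =====
def Spec_get_times_used (start_time : Int) (end_time : Int) (out : List Int) : Prop := out = get_times_used_alt start_time end_time
instance (start_time : Int) (end_time : Int) (out : List Int) : Decidable (Spec_get_times_used start_time end_time out) := by unfold Spec_get_times_used; infer_instance

-- ===== CLAIM (what is proved, stated in full; the proofs are below) =====
def Claim_equal_get_times_used : Prop := ∀ (start_time : Int) (end_time : Int), Dom_get_times_used start_time end_time → Spec_get_times_used start_time end_time (get_times_used start_time end_time)

-- ===== LEMMAS AND PROOFS =====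

-- next half-hour block at or after cur (the formula B's code applies to start_time)
def nc (cur : Int) : Int :=
  if cur % 100 = 0 then cur
  else if cur % 100 ≤ 30 then cur + (30 - cur % 100)
  else cur + (100 - cur % 100)

theorem pymod_eq (a b : Int) (hb : 0 < b) : PySem.Int.mod a b = a % b :=
  PySem.Int.mod_eq_emod_of_pos hb

theorem nc_ge (cur : Int) : cur ≤ nc cur := by
  unfold nc; split_ifs <;> omega

theorem bLoop_unfold (e c : Int) (t : List Int) : bLoop e c t =
    if c ≤ e then bLoop e (c + (if c % 100 = 0 then 30 else 70)) (t ++ [c]) else t := by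
  rw [bLoop, pymod_eq _ 100 (by norm_num)]

theorem key (e : Int) : ∀ (n : Nat) (cur : Int) (acc : List Int),
    (e + 1 - cur).toNat ≤ n → aLoop e cur acc = bLoop e (nc cur) acc := by
  intro n
  induction n with
  | zero =>
    intro cur acc hn
    rw [aLoop, bLoop]
    have := nc_ge cur
    rw [if_neg (by omega), if_neg (by omega)]
  | succ n ih =>
    intro cur acc hn
    by_cases hlt : cur < e + 1
    · rw [aLoop, if_pos hlt]
      simp only [pymod_eq _ 100 (by norm_num), pymod_eq _ 30 (by norm_num)]
      by_cases hm0 : cur % 100 = 0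
      · -- cur is a full-hour block: both loops emit cur
        rw [if_neg (by omega), if_pos (by omega)]
        rw [ih (cur + 1) (acc ++ [cur]) (by omega)]
        have h1 : nc (cur + 1) = cur + 30 := by unfold nc; split_ifs <;> omega
        have h2 : nc cur = cur := by unfold nc; split_ifs <;> omega
        rw [h1, h2]
        conv_rhs => rw [bLoop_unfold]
        rw [if_pos (by omega), if_pos hm0]
      · by_cases hm30 : cur % 100 = 30
        · -- cur is a half-hour block: both loops emit cur
          rw [if_neg (by omega), if_pos (by omega)]
          rw [ih (cur + 1) (acc ++ [cur]) (by omega)]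
          have h1 : nc (cur + 1) = cur + 70 := by unfold nc; split_ifs <;> omega
          have h2 : nc cur = cur := by unfold nc; split_ifs <;> omega
          rw [h1, h2]
          conv_rhs => rw [bLoop_unfold]
          rw [if_pos (by omega), if_neg (by omega)]
        · -- cur is not a block boundary: A skips a minute, B's target block is unchanged
          rw [if_neg (show ¬(cur % 100 % 30 = 0 ∧ cur % 100 < 60) by omega)]
          by_cases h59 : cur % 100 = 59
          · rw [if_pos h59, ih (cur + 41) acc (by omega)]
            have : nc (cur + 41) = nc cur := by unfold nc; split_ifs <;> omega
            rw [this]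
          · rw [if_neg h59, ih (cur + 1) acc (by omega)]
            have : nc (cur + 1) = nc cur := by unfold nc; split_ifs <;> omega
            rw [this]
    · rw [aLoop, bLoop]
      have := nc_ge cur
      rw [if_neg (by omega), if_neg (by omega)]

-- ===== VERDICT (by name: the statement is the Claim_ definition above) =====
theorem get_times_used_spec : Claim_equal_get_times_used := by
  intro s e _
  unfold Spec_get_times_used get_times_used get_times_used_alt
  rw [key e ((e + 1 - s).toNat) s [] (le_refl _)]
  simp only [pymod_eq _ 100 (by norm_num)]
  rfl
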